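-- pv_equiv track=rewrite | github.com/JanPinol/Advent-of-Code-2025 | 2025/day9/day9.py | get_intervals_at_y
-- ===== SOURCE A (Python) =====
-- def get_interior_at_y(check_y, v_segments):
--     crossings = []
--     for x, y_min, y_max in v_segments:
--         if y_min < check_y < y_max:
--             crossings.append(x)
--     crossings.sort()
--
--     intervals = []
--     for k in range(0, len(crossings), 2):
--         if k + 1 < len(crossings):
--             intervals.append((crossings[k], crossings[k + 1]))
--     return intervals
--
-- def merge_intervals(intervals):
--     if not intervals:
--         return []
--
--     intervals.sort()
--     merged = [list(intervals[0])]
--     for start, end in intervals[1:]: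
--         if start <= merged[-1][1]:
--             merged[-1][1] = max(merged[-1][1], end)
--         else:
--             merged.append([start, end])
--
--     return [(s, e) for s, e in merged]
--
-- def get_intervals_at_y(y, v_segments, h_segments):
--     h_at_y = []
--     for hy, hx_min, hx_max in h_segments:
--         if hy == y:
--             h_at_y.append((hx_min, hx_max))
--
--     interior_above = get_interior_at_y(y - 0.5, v_segments) if h_at_y else []
--     interior_below = get_interior_at_y(y + 0.5, v_segments) if h_at_y else []
--     interior_at = get_interior_at_y(y, v_segments)
--
--     all_intervals = h_at_y + interior_at + interior_above + interior_below
--     return merge_intervals(all_intervals)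
-- ===== SOURCE B (Python) =====
-- def get_intervals_at_y(y, v_segments, h_segments):
--     # horizontal segments at this y, with endpoints normalized to (low, high)
--     h_at_y = [(min(a, b), max(a, b)) for hy, a, b in h_segments if hy == y]
--
--     def interior(check_y):
--         xs = sorted(x for x, y0, y1 in v_segments if y0 < check_y < y1)
--         return list(zip(xs[::2], xs[1::2]))
--
--     interior_above = interior(y - 0.5) if h_at_y else []
--     interior_below = interior(y + 0.5) if h_at_y else []
--     all_intervals = h_at_y + interior(y) + interior_above + interior_below
--
--     # union by event sweep: starts before ends at equal x, so touching intervals merge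
--     events = sorted([(s, 0) for s, e in all_intervals] + [(e, 1) for s, e in all_intervals])
--     merged, depth, start = [], 0, 0
--     for x, tag in events:
--         if tag == 0:
--             if depth == 0:
--                 start = x
--             depth += 1
--         else:
--             depth -= 1
--             if depth == 0:
--                 merged.append((start, x))
--     return merged
-- ===== Notes on version B (the rewrite author's own statement) =====
-- stated objective: alternative
-- what changed: The sort-then-greedy merge_intervals (sort intervals, mutate merged[-1] while extending) is replaced by an event sweep: emit (x,+start)/(x,+end) events, sort them with starts before ends at equal x, and scan once with an active-depth counter, emitting an interval each time the depth returns to zero; horizontal segments' endpoints are normalized to (low, high).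
-- intended difference: On inputs containing a horizontal segment at y with reversed endpoints (hx_min > hx_max), A emits the raw reversed pair (or merges by its raw coordinates), e.g. [(2,1)]; B treats segment endpoints as unordered and returns the properly ordered covered interval [(1,2)], the intended reading of a segment. — e.g. on get_intervals_at_y(0, [], [(0, 2, 1)]): A returns [(2, 1)], B returns [(1, 2)]
import Mathlib
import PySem

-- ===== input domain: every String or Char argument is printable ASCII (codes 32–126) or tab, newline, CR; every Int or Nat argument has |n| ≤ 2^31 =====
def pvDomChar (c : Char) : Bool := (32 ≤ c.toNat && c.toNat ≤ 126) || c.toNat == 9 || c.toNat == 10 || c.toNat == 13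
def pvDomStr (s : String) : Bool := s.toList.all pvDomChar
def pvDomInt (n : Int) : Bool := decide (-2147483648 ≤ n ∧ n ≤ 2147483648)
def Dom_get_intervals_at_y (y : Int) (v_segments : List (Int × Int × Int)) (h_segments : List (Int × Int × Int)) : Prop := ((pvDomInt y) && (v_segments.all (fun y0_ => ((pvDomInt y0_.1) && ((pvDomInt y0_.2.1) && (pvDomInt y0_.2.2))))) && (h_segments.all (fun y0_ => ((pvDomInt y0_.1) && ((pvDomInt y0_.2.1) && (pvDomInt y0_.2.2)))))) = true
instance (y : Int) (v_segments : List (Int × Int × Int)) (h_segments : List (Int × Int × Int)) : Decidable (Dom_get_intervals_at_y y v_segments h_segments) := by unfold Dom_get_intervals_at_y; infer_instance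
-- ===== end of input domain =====

-- B replaces A's sort-then-greedy merge_intervals by an event sweep (starts/ends with a depth
-- counter) and normalizes each horizontal segment's endpoints to (low, high); objective: alternative.

-- ===== PORT A =====
-- Notes on exactness of the transliteration:
-- * get_interior_at_y is called at check_y ∈ {y-0.5, y, y+0.5}; the float comparisons
--   y_min < check_y < y_max on |ints| ≤ 2^31 are exact, and in DOUBLED coordinates
--   (cy2 = 2*check_y ∈ {2y-1, 2y, 2y+1}) they are exactly 2*y_min < cy2 ∧ cy2 < 2*y_max.
-- * Python sorts tuples lexicographically; `PySem.List.sorted xs (fun p => toLex p)` with the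
--   lexicographic order on Int ×ₗ Int is exactly `xs.sort()` on pairs of ints.

-- for k in range(0, len(c), 2): if k + 1 < len(c): intervals.append((c[k], c[k+1]))
-- — the index loop takes elements two at a time: the obvious two-at-a-time recursion (exact)
def pvPairLoop : List Int → List (Int × Int)
  | a :: b :: rest => (a, b) :: pvPairLoop rest
  | _ => []

def pvInterior (cy2 : Int) (v_segments : List (Int × Int × Int)) : List (Int × Int) :=
  let crossings := v_segments.foldl
    (fun acc t => if 2 * t.2.1 < cy2 ∧ cy2 < 2 * t.2.2 then acc ++ [t.1] else acc) []
  pvPairLoop (PySem.List.sorted crossings (fun x => x))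

-- the for-loop of merge_intervals: merged[-1] is the `cur` accumulator, mutated in place
def pvMergeLoop (cur : Int × Int) : List (Int × Int) → List (Int × Int)
  | [] => [cur]
  | (s, e) :: rest =>
    if s ≤ cur.2 then pvMergeLoop (cur.1, max cur.2 e) rest
    else cur :: pvMergeLoop (s, e) rest

def pvMergeIntervals (intervals : List (Int × Int)) : List (Int × Int) :=
  match PySem.List.sorted intervals (fun p => toLex p) with
  | [] => []
  | c :: rest => pvMergeLoop c rest

def get_intervals_at_y (y : Int) (v_segments : List (Int × Int × Int)) (h_segments : List (Int × Int × Int)) : List (Int × Int) :=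
  let h_at_y := h_segments.foldl
    (fun acc t => if t.1 = y then acc ++ [(t.2.1, t.2.2)] else acc) []
  let interior_above := if h_at_y ≠ [] then pvInterior (2 * y - 1) v_segments else []
  let interior_below := if h_at_y ≠ [] then pvInterior (2 * y + 1) v_segments else []
  let interior_at := pvInterior (2 * y) v_segments
  pvMergeIntervals (h_at_y ++ interior_at ++ interior_above ++ interior_below)

-- ===== PORT B =====
-- xs[::2] and xs[1::2] (PySem.List.slice has no step argument): ported by hand, exact
def pvEvens : List Int → List Int
  | [] => []
  | [a] => [a]
  | a :: _ :: rest => a :: pvEvens rest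

def pvOdds : List Int → List Int
  | [] => []
  | [_] => []
  | _ :: b :: rest => b :: pvOdds rest

def pvInteriorAlt (cy2 : Int) (v_segments : List (Int × Int × Int)) : List (Int × Int) :=
  let xs := PySem.List.sorted
    ((v_segments.filter (fun t => decide (2 * t.2.1 < cy2 ∧ cy2 < 2 * t.2.2))).map (fun t => t.1))
    (fun x => x)
  (pvEvens xs).zip (pvOdds xs)

-- the sweep loop: merged/depth/start state, starts (tag 0) before ends (tag 1) at equal x
def pvSweepLoop (merged : List (Int × Int)) (depth : Int) (start : Int) : List (Int × Int) → List (Int × Int)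
  | [] => merged
  | (x, tag) :: rest =>
    if tag = 0 then pvSweepLoop merged (depth + 1) (if depth = 0 then x else start) rest
    else pvSweepLoop (if depth - 1 = 0 then merged ++ [(start, x)] else merged) (depth - 1) start rest

def get_intervals_at_y_alt (y : Int) (v_segments : List (Int × Int × Int)) (h_segments : List (Int × Int × Int)) : List (Int × Int) :=
  let h_at_y := (h_segments.filter (fun t => decide (t.1 = y))).map
    (fun t => (min t.2.1 t.2.2, max t.2.1 t.2.2))
  let interior_above := if h_at_y ≠ [] then pvInteriorAlt (2 * y - 1) v_segments else []
  let interior_below := if h_at_y ≠ [] then pvInteriorAlt (2 * y + 1) v_segments else []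
  let all_intervals := h_at_y ++ pvInteriorAlt (2 * y) v_segments ++ interior_above ++ interior_below
  let events := PySem.List.sorted
    (all_intervals.map (fun p => (p.1, (0 : Int))) ++ all_intervals.map (fun p => (p.2, (1 : Int))))
    (fun p => toLex p)
  pvSweepLoop [] 0 0 events

-- ===== PRECONDITION & SPEC =====
-- On horizontal segments listed at y with reversed endpoints (hx_min > hx_max), A's merge emits the
-- raw reversed pair (or merges by its raw coordinates), while B treats the endpoints as unordered
-- and returns the properly ordered covered interval — the intended reading of a segment.
def D_get_intervals_at_y (y : Int) (v_segments : List (Int × Int × Int)) (h_segments : List (Int × Int × Int)) : Prop :=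
  ∃ t ∈ h_segments, t.1 = y ∧ t.2.2 < t.2.1

instance (y : Int) (v_segments : List (Int × Int × Int)) (h_segments : List (Int × Int × Int)) : Decidable (D_get_intervals_at_y y v_segments h_segments) := by unfold D_get_intervals_at_y; infer_instance

def Spec_get_intervals_at_y (y : Int) (v_segments : List (Int × Int × Int)) (h_segments : List (Int × Int × Int)) (out : List (Int × Int)) : Prop := ¬ D_get_intervals_at_y y v_segments h_segments → out = get_intervals_at_y_alt y v_segments h_segments
instance (y : Int) (v_segments : List (Int × Int × Int)) (h_segments : List (Int × Int × Int)) (out : List (Int × Int)) : Decidable (Spec_get_intervals_at_y y v_segments h_segments out) := by unfold Spec_get_intervals_at_y; infer_instance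

def pvDiffWitness_get_intervals_at_y : Int × (List (Int × Int × Int)) × (List (Int × Int × Int)) :=
  (0, [], [(0, 2, 1)])

def pvDiffWitnessOut_get_intervals_at_y : (List (Int × Int)) × (List (Int × Int)) :=
  ([(2, 1)], [(1, 2)])

-- ===== CLAIM (what is proved, stated in full; the proofs are below) =====
def Claim_unchanged_get_intervals_at_y : Prop := ∀ (y : Int) (v_segments : List (Int × Int × Int)) (h_segments : List (Int × Int × Int)), Dom_get_intervals_at_y y v_segments h_segments → Spec_get_intervals_at_y y v_segments h_segments (get_intervals_at_y y v_segments h_segments)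
def Claim_changed_get_intervals_at_y : Prop := Dom_get_intervals_at_y (pvDiffWitness_get_intervals_at_y.1) (pvDiffWitness_get_intervals_at_y.2.1) (pvDiffWitness_get_intervals_at_y.2.2) ∧ D_get_intervals_at_y (pvDiffWitness_get_intervals_at_y.1) (pvDiffWitness_get_intervals_at_y.2.1) (pvDiffWitness_get_intervals_at_y.2.2) ∧ get_intervals_at_y (pvDiffWitness_get_intervals_at_y.1) (pvDiffWitness_get_intervals_at_y.2.1) (pvDiffWitness_get_intervals_at_y.2.2) = pvDiffWitnessOut_get_intervals_at_y.1 ∧ get_intervals_at_y_alt (pvDiffWitness_get_intervals_at_y.1) (pvDiffWitness_get_intervals_at_y.2.1) (pvDiffWitness_get_intervals_at_y.2.2) = pvDiffWitnessOut_get_intervals_at_y.2 ∧ pvDiffWitnessOut_get_intervals_at_y.1 ≠ pvDiffWitnessOut_get_intervals_at_y.2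


-- ===== LEMMAS AND PROOFS =====

-- the start/end event list of a list of intervals, as built by port B
def pvEventsOf (I : List (Int × Int)) : List (Int × Int) :=
  I.map (fun p => (p.1, (0 : Int))) ++ I.map (fun p => (p.2, (1 : Int)))

-- naming a Python tuple sort: any lex-nondecreasing rearrangement is THE sorted list
theorem pv_sorted_eq {xs ys : List (Int × Int)} (hperm : ys.Perm xs)
    (hp : ys.Pairwise (fun a b => toLex a ≤ toLex b)) :
    PySem.List.sorted xs (fun p => toLex p) = ys := by
  refine PySem.List.eq_of_perm_of_pairwise_le_of_injective (fun p => toLex p) toLex.injective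
    ((PySem.List.sorted_perm xs _ false).trans hperm.symm) ?_ hp
  · exact PySem.List.sorted_pairwise xs _

theorem pv_lex_le (p q : Int × Int) :
    toLex p ≤ toLex q ↔ (p.1 < q.1 ∨ (p.1 = q.1 ∧ p.2 ≤ q.2)) := by
  rw [Prod.Lex.le_iff]; rfl

theorem pv_zip_evens_odds : ∀ xs : List Int, (pvEvens xs).zip (pvOdds xs) = pvPairLoop xs
  | [] => by simp [pvEvens, pvOdds, pvPairLoop]
  | [a] => by simp [pvEvens, pvOdds, pvPairLoop]
  | a :: b :: t => by simp [pvEvens, pvOdds, pvPairLoop, pv_zip_evens_odds t]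

theorem pv_interior_alt_eq (cy2 : Int) (v : List (Int × Int × Int)) :
    pvInteriorAlt cy2 v = pvInterior cy2 v := by
  unfold pvInterior pvInteriorAlt
  rw [PySem.List.foldl_append_ite (p := fun t : Int × Int × Int => 2 * t.2.1 < cy2 ∧ cy2 < 2 * t.2.2)
    (f := fun t : Int × Int × Int => t.1)]
  simp only [List.nil_append]
  exact pv_zip_evens_odds _

theorem pv_pairLoop_proper : ∀ (xs : List Int), xs.Pairwise (· ≤ ·) →
    ∀ p ∈ pvPairLoop xs, p.1 ≤ p.2
  | [] => by simp [pvPairLoop]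
  | [a] => by simp [pvPairLoop]
  | a :: b :: t => by
    intro h p hp
    simp only [pvPairLoop, List.mem_cons] at hp
    rcases hp with rfl | hp
    · exact (List.pairwise_cons.mp h).1 b (by simp)
    · exact pv_pairLoop_proper t ((List.pairwise_cons.mp (List.pairwise_cons.mp h).2).2) p hp

theorem pv_interior_proper (cy2 : Int) (v : List (Int × Int × Int)) :
    ∀ p ∈ pvInterior cy2 v, p.1 ≤ p.2 := by
  unfold pvInterior
  refine pv_pairLoop_proper _ ?_
  simpa using PySem.List.sorted_pairwise
    (v.foldl (fun acc t => if 2 * t.2.1 < cy2 ∧ cy2 < 2 * t.2.2 then acc ++ [t.1] else acc) [])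
    (fun x => x)

theorem pv_dropWhile_ge : ∀ {Q : List Int} {s1 : Int}, Q.Pairwise (· ≤ ·) →
    ∀ q ∈ Q.dropWhile (fun q => decide (q < s1)), s1 ≤ q := by
  intro Q s1 hQ
  induction Q with
  | nil => simp
  | cons a t ih =>
    by_cases ha : a < s1
    · simpa [List.dropWhile_cons, ha] using ih (List.pairwise_cons.mp hQ).2
    · intro q hq
      simp only [List.dropWhile_cons, decide_eq_true_eq, ha, if_false, List.mem_cons] at hq
      rcases hq with rfl | hq
      · omega
      · have := (List.pairwise_cons.mp hQ).1 q hq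
        omega

-- last element of a nonempty list (the maximum of a sorted one); proof-side helper
def pvLast : List Int → Int
  | [] => 0
  | [a] => a
  | _ :: b :: t => pvLast (b :: t)

theorem pv_last_cons {a : Int} {Q : List Int} (h : Q ≠ []) : pvLast (a :: Q) = pvLast Q := by
  cases Q with
  | nil => exact absurd rfl h
  | cons b t => rfl

theorem pv_le_last : ∀ {Q : List Int}, Q.Pairwise (· ≤ ·) → ∀ q ∈ Q, q ≤ pvLast Q
  | [] => by simp
  | [a] => by simp [pvLast]
  | a :: b :: t => by
    intro h q hq
    have h1 := List.pairwise_cons.mp h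
    rcases List.mem_cons.mp hq with rfl | hq
    · have hb : b ≤ pvLast (b :: t) := pv_le_last h1.2 b (by simp)
      have := h1.1 b (by simp)
      calc q ≤ b := this
        _ ≤ pvLast (b :: t) := hb
        _ = pvLast (q :: b :: t) := rfl
    · exact le_trans (pv_le_last h1.2 q hq) (le_of_eq rfl)

theorem pv_last_mem : ∀ {Q : List Int}, Q ≠ [] → pvLast Q ∈ Q
  | [] => by simp
  | [a] => by simp [pvLast]
  | a :: b :: t => by
    intro _
    have := pv_last_mem (Q := b :: t) (by simp)
    simpa [pvLast] using Or.inr this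

theorem pv_last_append : ∀ (Q1 : List Int) {Q2 : List Int}, Q2 ≠ [] →
    pvLast (Q1 ++ Q2) = pvLast Q2
  | [], _, _ => rfl
  | a :: t, Q2, h => by
    have ht : t ++ Q2 ≠ [] := by simp [h]
    rw [List.cons_append, pv_last_cons ht, pv_last_append t h]

theorem pv_last_orderedInsert : ∀ {Q : List Int}, Q.Pairwise (· ≤ ·) → Q ≠ [] → ∀ (e : Int),
    pvLast (List.orderedInsert (· ≤ ·) e Q) = max (pvLast Q) e
  | [] => by simp
  | a :: t => by
    intro hQ _ e
    by_cases he : e ≤ a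
    · have : pvLast (a :: t) = pvLast (e :: a :: t) := rfl
      rw [List.orderedInsert, if_pos he, ← this]
      have : e ≤ pvLast (a :: t) := le_trans he (pv_le_last hQ a (by simp))
      omega
    · rw [List.orderedInsert, if_neg he]
      cases t with
      | nil =>
        simp only [List.orderedInsert, pvLast]
        have : a ≤ e := by omega
        omega
      | cons b t' =>
        have h1 := List.pairwise_cons.mp hQ
        have hne : List.orderedInsert (· ≤ ·) e (b :: t') ≠ [] := by
          have := (List.perm_orderedInsert (· ≤ ·) e (b :: t')).length_eq
          intro hc; rw [hc] at this; simp at this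
        rw [pv_last_cons hne, pv_last_orderedInsert h1.2 (by simp) e]
        rfl

theorem pv_sweep_step_start (merged : List (Int × Int)) (d start x : Int) (rest : List (Int × Int)) :
    pvSweepLoop merged d start ((x, (0 : Int)) :: rest)
      = pvSweepLoop merged (d + 1) (if d = 0 then x else start) rest := by
  simp [pvSweepLoop]

theorem pv_sweep_step_end (merged : List (Int × Int)) (d start x : Int) (rest : List (Int × Int)) :
    pvSweepLoop merged d start ((x, (1 : Int)) :: rest)
      = pvSweepLoop (if d - 1 = 0 then merged ++ [(start, x)] else merged) (d - 1) start rest := by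
  simp [pvSweepLoop]

-- a run of end events that never empties the active set: depth just counts down
theorem pv_sweep_run_no_emit : ∀ (Q1 : List Int) (d : Int), (Q1.length : Int) < d →
    ∀ (merged : List (Int × Int)) (start : Int) (rest : List (Int × Int)),
    pvSweepLoop merged d start (Q1.map (fun q => (q, 1)) ++ rest)
      = pvSweepLoop merged (d - Q1.length) start rest
  | [], d, h, merged, start, rest => by simp
  | q :: t, d, h, merged, start, rest => by
    simp only [List.map_cons, List.cons_append]
    rw [pv_sweep_step_end, if_neg (by simp at h; omega)]
    rw [pv_sweep_run_no_emit t (d - 1) (by simp at h ⊢; omega) merged start rest]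
    congr 1
    simp; omega

-- a run of end events that empties the active set: emits (start, last end) and resets depth to 0
theorem pv_sweep_run_emit : ∀ (Q : List Int), Q ≠ [] → Q.Pairwise (· ≤ ·) →
    ∀ (merged : List (Int × Int)) (start : Int) (rest : List (Int × Int)),
    pvSweepLoop merged (Q.length : Int) start (Q.map (fun q => (q, 1)) ++ rest)
      = pvSweepLoop (merged ++ [(start, pvLast Q)]) 0 start rest
  | [], h, _, _, _, _ => absurd rfl h
  | [q], _, _, merged, start, rest => by
    simp only [List.map_cons, List.map_nil, List.cons_append, List.nil_append,
      List.length_cons, List.length_nil, pvLast]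
    rw [pv_sweep_step_end]
    norm_num
  | q :: b :: t, _, hp, merged, start, rest => by
    simp only [List.map_cons, List.cons_append]
    rw [pv_sweep_step_end, if_neg (by simp; omega)]
    have hlen : ((q :: b :: t).length : Int) - 1 = ((b :: t).length : Int) := by simp
    rw [hlen, show ((b, (1 : Int)) :: (List.map (fun q => (q, 1)) t ++ rest))
        = (List.map (fun q => (q, (1 : Int))) (b :: t) ++ rest) from by simp,
      pv_sweep_run_emit (b :: t) (by simp) (List.pairwise_cons.mp hp).2 merged start rest]
    rfl

theorem pv_orderedInsert_pairwise (e : Int) : ∀ {Q : List Int}, Q.Pairwise (· ≤ ·) →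
    (List.orderedInsert (· ≤ ·) e Q).Pairwise (· ≤ ·)
  | [], _ => by simp
  | a :: t, h => by
    obtain ⟨h1, h2⟩ := List.pairwise_cons.mp h
    by_cases he : e ≤ a
    · rw [List.orderedInsert, if_pos he]
      refine List.pairwise_cons.mpr ⟨?_, h⟩
      intro b hb
      rcases List.mem_cons.mp hb with rfl | hb
      · exact he
      · exact le_trans he (h1 b hb)
    · rw [List.orderedInsert, if_neg he]
      refine List.pairwise_cons.mpr ⟨?_, pv_orderedInsert_pairwise e h2⟩
      intro b hb
      rw [(List.perm_orderedInsert (· ≤ ·) e t).mem_iff, List.mem_cons] at hb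
      rcases hb with rfl | hb
      · omega
      · exact h1 b hb

-- peeling the minimal start event off the sorted event list, with pending ends Q
theorem pv_sorted_events_cons (s1 e1 : Int) (L' : List (Int × Int)) (Q : List Int)
    (hL : (((s1, e1) :: L').Pairwise (fun a b => toLex a ≤ toLex b)))
    (hprop : ∀ p ∈ (s1, e1) :: L', p.1 ≤ p.2)
    (hQ : Q.Pairwise (· ≤ ·)) :
    PySem.List.sorted (pvEventsOf ((s1, e1) :: L') ++ Q.map (fun q => (q, 1))) (fun p => toLex p)
      = (Q.takeWhile (fun q => decide (q < s1))).map (fun q => (q, (1 : Int)))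
        ++ (s1, 0) :: PySem.List.sorted
              (pvEventsOf L'
                ++ (List.orderedInsert (· ≤ ·) e1 (Q.dropWhile (fun q => decide (q < s1)))).map (fun q => (q, 1)))
              (fun p => toLex p) := by
  have hhead := (List.pairwise_cons.mp hL).1
  have hQ1lt : ∀ q ∈ Q.takeWhile (fun q => decide (q < s1)), q < s1 := by
    intro q hq
    simpa using List.mem_takeWhile_imp hq
  have hT_ge : ∀ x ∈ PySem.List.sorted
      (pvEventsOf L'
        ++ (List.orderedInsert (· ≤ ·) e1 (Q.dropWhile (fun q => decide (q < s1)))).map (fun q => (q, 1)))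
      (fun p => toLex p), s1 ≤ x.1 ∧ 0 ≤ x.2 := by
    intro x hx
    rw [PySem.List.mem_sorted] at hx
    rcases List.mem_append.mp hx with hx | hx
    · rcases List.mem_append.mp hx with hx | hx
      · obtain ⟨p, hp, rfl⟩ := List.mem_map.mp hx
        have h1 := hhead p hp
        rw [pv_lex_le] at h1
        exact ⟨by simp only []; omega, by norm_num⟩
      · obtain ⟨p, hp, rfl⟩ := List.mem_map.mp hx
        have h1 := hhead p hp
        rw [pv_lex_le] at h1
        have h2 := hprop p (List.mem_cons_of_mem _ hp)
        exact ⟨by simp only []; omega, by norm_num⟩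
    · obtain ⟨q, hq, rfl⟩ := List.mem_map.mp hx
      rw [(List.perm_orderedInsert (· ≤ ·) e1 _).mem_iff, List.mem_cons] at hq
      constructor
      · rcases hq with rfl | hq
        · exact hprop (s1, q) (by simp)
        · exact pv_dropWhile_ge hQ q hq
      · norm_num
  apply pv_sorted_eq
  · -- permutation
    have hTp := PySem.List.sorted_perm
      (pvEventsOf L'
        ++ (List.orderedInsert (· ≤ ·) e1 (Q.dropWhile (fun q => decide (q < s1)))).map (fun q => (q, 1)))
      (fun p => toLex p) false
    have hOI : ((List.orderedInsert (· ≤ ·) e1 (Q.dropWhile (fun q => decide (q < s1)))).map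
        (fun q => (q, (1 : Int)))).Perm
        ((e1, 1) :: (Q.dropWhile (fun q => decide (q < s1))).map (fun q => (q, 1))) := by
      simpa using (List.perm_orderedInsert (· ≤ ·) e1 (Q.dropWhile (fun q => decide (q < s1)))).map
        (fun q => (q, (1 : Int)))
    have hQsplit : Q.map (fun q => (q, (1 : Int)))
        = (Q.takeWhile (fun q => decide (q < s1))).map (fun q => (q, 1))
          ++ (Q.dropWhile (fun q => decide (q < s1))).map (fun q => (q, 1)) := by
      rw [← List.map_append, List.takeWhile_append_dropWhile]
    rw [List.perm_iff_count]
    intro a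
    have h1 := hTp.count_eq a
    have h2 := hOI.count_eq a
    simp only [pvEventsOf, List.map_cons, List.count_append, List.count_cons, hQsplit] at h1 h2 ⊢
    omega
  · -- pairwise
    rw [List.pairwise_append]
    refine ⟨?_, ?_, ?_⟩
    · refine List.Pairwise.map _ (fun a b hab => ?_)
        ((hQ.sublist (List.takeWhile_sublist _)))
      rw [pv_lex_le]
      rcases lt_or_eq_of_le hab with h | h
      · exact Or.inl h
      · exact Or.inr ⟨h, le_refl _⟩
    · rw [List.pairwise_cons]
      refine ⟨fun x hx => ?_, PySem.List.sorted_pairwise _ _⟩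
      obtain ⟨h1, h2⟩ := hT_ge x hx
      rw [pv_lex_le]
      rcases lt_or_eq_of_le h1 with h | h
      · exact Or.inl h
      · exact Or.inr ⟨h, h2⟩
    · intro a ha b hb
      obtain ⟨q, hq, rfl⟩ := List.mem_map.mp ha
      have hqlt := hQ1lt q hq
      rcases List.mem_cons.mp hb with rfl | hb
      · rw [pv_lex_le]
        exact Or.inl hqlt
      · obtain ⟨h1, _⟩ := hT_ge b hb
        rw [pv_lex_le]
        exact Or.inl (by simp only []; omega)

-- the sweep over the sorted events of L with pending ends Q equals A's greedy loop from (start, max Q)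
theorem pv_sweep_master : ∀ (L : List (Int × Int)) (Q : List Int)
    (merged : List (Int × Int)) (start : Int),
    L.Pairwise (fun a b => toLex a ≤ toLex b) → (∀ p ∈ L, p.1 ≤ p.2) →
    Q ≠ [] → Q.Pairwise (· ≤ ·) →
    pvSweepLoop merged (Q.length : Int) start
        (PySem.List.sorted (pvEventsOf L ++ Q.map (fun q => (q, 1))) (fun p => toLex p))
      = merged ++ pvMergeLoop (start, pvLast Q) L := by
  intro L
  induction L with
  | nil =>
    intro Q merged start _ _ hne hQs
    have hpw : (Q.map (fun q => (q, (1 : Int)))).Pairwise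
        (fun a b => (fun p : Int × Int => toLex p) a ≤ (fun p : Int × Int => toLex p) b) := by
      refine List.Pairwise.map _ (fun a b hab => ?_) hQs
      rw [pv_lex_le]
      rcases lt_or_eq_of_le hab with h | h
      · exact Or.inl h
      · exact Or.inr ⟨h, le_refl _⟩
    rw [show pvEventsOf [] ++ Q.map (fun q => (q, (1 : Int))) = Q.map (fun q => (q, 1)) from by
      simp [pvEventsOf]]
    rw [PySem.List.sorted_eq_self_of_pairwise _ _ hpw]
    rw [← List.append_nil (Q.map (fun q => (q, (1 : Int)))),
      pv_sweep_run_emit Q hne hQs merged start []]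
    simp [pvSweepLoop, pvMergeLoop]
  | cons c L' ih =>
    intro Q merged start hL hprop hne hQs
    obtain ⟨s1, e1⟩ := c
    rw [pv_sorted_events_cons s1 e1 L' Q hL hprop hQs]
    have hsplit : Q.takeWhile (fun q => decide (q < s1)) ++ Q.dropWhile (fun q => decide (q < s1)) = Q :=
      List.takeWhile_append_dropWhile
    have hQ1lt : ∀ q ∈ Q.takeWhile (fun q => decide (q < s1)), q < s1 := by
      intro q hq; simpa using List.mem_takeWhile_imp hq
    have hQ2ge : ∀ q ∈ Q.dropWhile (fun q => decide (q < s1)), s1 ≤ q := pv_dropWhile_ge hQs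
    have hQ2pw : (Q.dropWhile (fun q => decide (q < s1))).Pairwise (· ≤ ·) :=
      hQs.sublist (List.dropWhile_sublist _)
    have hLtail : L'.Pairwise (fun a b => toLex a ≤ toLex b) := (List.pairwise_cons.mp hL).2
    have hptail : ∀ p ∈ L', p.1 ≤ p.2 := fun p hp => hprop p (List.mem_cons_of_mem _ hp)
    by_cases hQ2 : Q.dropWhile (fun q => decide (q < s1)) = []
    · have hQ1 : Q.takeWhile (fun q => decide (q < s1)) = Q := by
        have h := hsplit
        rw [hQ2, List.append_nil] at h
        exact h
      rw [hQ1, hQ2]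
      rw [show List.orderedInsert (· ≤ ·) e1 ([] : List Int) = [e1] from rfl]
      rw [pv_sweep_run_emit Q hne hQs merged start]
      rw [pv_sweep_step_start, if_pos rfl]
      rw [show ((0 : Int) + 1) = (([e1].length : Nat) : Int) from by simp]
      rw [ih [e1] (merged ++ [(start, pvLast Q)]) s1 hLtail hptail (by simp) (by simp)]
      have hlt : pvLast Q < s1 := hQ1lt (pvLast Q) (by rw [hQ1]; exact pv_last_mem hne)
      simp only [pvMergeLoop, pvLast]
      rw [if_neg (not_le.mpr hlt)]
      simp
    · have hQ1len : ((Q.takeWhile (fun q => decide (q < s1))).length : Int) < (Q.length : Int) := by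
        have := congrArg List.length hsplit
        simp only [List.length_append] at this
        have h2 : 0 < (Q.dropWhile (fun q => decide (q < s1))).length :=
          List.length_pos_iff.mpr hQ2
        omega
      rw [pv_sweep_run_no_emit _ _ hQ1len]
      rw [pv_sweep_step_start]
      have hdlen : (Q.length : Int) - ((Q.takeWhile (fun q => decide (q < s1))).length : Int)
          = ((Q.dropWhile (fun q => decide (q < s1))).length : Int) := by
        have := congrArg List.length hsplit
        simp only [List.length_append] at this
        omega
      rw [hdlen, if_neg (by
        have h2 : 0 < (Q.dropWhile (fun q => decide (q < s1))).length :=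
          List.length_pos_iff.mpr hQ2
        omega)]
      have hlenOI : ((Q.dropWhile (fun q => decide (q < s1))).length : Int) + 1
          = ((List.orderedInsert (· ≤ ·) e1 (Q.dropWhile (fun q => decide (q < s1)))).length : Int) := by
        rw [List.orderedInsert_length]; push_cast; ring
      rw [hlenOI]
      have hOIne : List.orderedInsert (· ≤ ·) e1 (Q.dropWhile (fun q => decide (q < s1))) ≠ [] := by
        have := List.orderedInsert_length (· ≤ ·) (Q.dropWhile (fun q => decide (q < s1))) e1
        intro hc; rw [hc] at this; simp at this
      have hOIpw : (List.orderedInsert (· ≤ ·) e1 (Q.dropWhile (fun q => decide (q < s1)))).Pairwise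
          (· ≤ ·) := pv_orderedInsert_pairwise e1 hQ2pw
      rw [ih _ merged start hLtail hptail hOIne hOIpw]
      have hlastQ : pvLast Q = pvLast (Q.dropWhile (fun q => decide (q < s1))) := by
        conv_lhs => rw [← hsplit]
        exact pv_last_append _ hQ2
      have hlastOI : pvLast (List.orderedInsert (· ≤ ·) e1 (Q.dropWhile (fun q => decide (q < s1))))
          = max (pvLast Q) e1 := by
        rw [pv_last_orderedInsert hQ2pw hQ2 e1, hlastQ]
      have hle : s1 ≤ pvLast Q := by
        obtain ⟨q, hq⟩ := List.exists_mem_of_ne_nil _ hQ2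
        exact le_trans (hQ2ge q hq) (hlastQ ▸ pv_le_last hQ2pw q hq)
      simp only [pvMergeLoop]
      rw [if_pos hle, hlastOI]

theorem pv_sweep_eq_merge (I : List (Int × Int)) (hprop : ∀ p ∈ I, p.1 ≤ p.2) :
    pvSweepLoop [] 0 0 (PySem.List.sorted (pvEventsOf I) (fun p => toLex p))
      = pvMergeIntervals I := by
  have hIperm := (PySem.List.sorted_perm I (fun p => toLex p) false).symm
  have hperm : (pvEventsOf I).Perm (pvEventsOf (PySem.List.sorted I (fun p => toLex p))) :=
    (hIperm.map _).append (hIperm.map _)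
  rw [PySem.List.sorted_eq_sorted_of_perm _ _ _ toLex.injective hperm]
  unfold pvMergeIntervals
  cases hL : PySem.List.sorted I (fun p => toLex p) with
  | nil => simp [pvEventsOf, PySem.List.sorted, pvSweepLoop]
  | cons c rest =>
    obtain ⟨s1, e1⟩ := c
    have hLpw : (((s1, e1) :: rest)).Pairwise (fun a b => toLex a ≤ toLex b) :=
      hL ▸ PySem.List.sorted_pairwise I (fun p => toLex p)
    have hLprop : ∀ p ∈ (s1, e1) :: rest, p.1 ≤ p.2 := by
      intro p hp
      exact hprop p ((PySem.List.mem_sorted I (fun p => toLex p) false p).mp (hL ▸ hp))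
    rw [show pvEventsOf ((s1, e1) :: rest)
        = pvEventsOf ((s1, e1) :: rest) ++ ([] : List Int).map (fun q => (q, 1)) from by simp]
    rw [pv_sorted_events_cons s1 e1 rest [] hLpw hLprop (by simp)]
    simp only [List.takeWhile_nil, List.dropWhile_nil, List.map_nil, List.nil_append]
    rw [pv_sweep_step_start, if_pos rfl]
    rw [show List.orderedInsert (· ≤ ·) e1 ([] : List Int) = [e1] from rfl]
    rw [show ((0 : Int) + 1) = (([e1].length : Nat) : Int) from by simp]
    rw [pv_sweep_master rest [e1] [] s1 (List.pairwise_cons.mp hLpw).2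
      (fun p hp => hLprop p (List.mem_cons_of_mem _ hp)) (by simp) (by simp)]
    simp [pvLast]

theorem pv_final (y : Int) (v h : List (Int × Int × Int))
    (hD : ¬ D_get_intervals_at_y y v h) :
    get_intervals_at_y y v h = get_intervals_at_y_alt y v h := by
  have hh : h.foldl (fun acc t => if t.1 = y then acc ++ [(t.2.1, t.2.2)] else acc) []
      = (h.filter (fun t => decide (t.1 = y))).map (fun t => (min t.2.1 t.2.2, max t.2.1 t.2.2)) := by
    rw [PySem.List.foldl_append_ite (p := fun t : Int × Int × Int => t.1 = y)
      (f := fun t : Int × Int × Int => (t.2.1, t.2.2))]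
    simp only [List.nil_append]
    refine List.map_congr_left (fun t ht => ?_)
    obtain ⟨htmem, hty⟩ := List.mem_filter.mp ht
    have hle : t.2.1 ≤ t.2.2 := by
      by_contra hc
      exact hD ⟨t, htmem, by simpa using hty, by omega⟩
    simp [min_eq_left hle, max_eq_right hle]
  unfold get_intervals_at_y get_intervals_at_y_alt
  rw [hh, pv_interior_alt_eq, pv_interior_alt_eq, pv_interior_alt_eq]
  set hy := (h.filter (fun t => decide (t.1 = y))).map (fun t => (min t.2.1 t.2.2, max t.2.1 t.2.2)) with hhy
  set AI := hy ++ pvInterior (2 * y) v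
      ++ (if hy ≠ [] then pvInterior (2 * y - 1) v else [])
      ++ (if hy ≠ [] then pvInterior (2 * y + 1) v else []) with hAI
  have hproper : ∀ p ∈ AI, p.1 ≤ p.2 := by
    intro p hp
    rw [hAI] at hp
    rcases List.mem_append.mp hp with hp | hp
    · rcases List.mem_append.mp hp with hp | hp
      · rcases List.mem_append.mp hp with hp | hp
        · obtain ⟨t, _, rfl⟩ := List.mem_map.mp (hhy ▸ hp)
          exact min_le_max
        · exact pv_interior_proper _ _ p hp
      · split at hp
        · exact pv_interior_proper _ _ p hp
        · simp at hp
    · split at hp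
      · exact pv_interior_proper _ _ p hp
      · simp at hp
  have := (pv_sweep_eq_merge AI hproper).symm
  simpa [pvEventsOf, hAI, List.append_assoc] using this

-- ===== VERDICT (by name: the statement is the Claim_ definition above) =====
theorem get_intervals_at_y_spec : Claim_unchanged_get_intervals_at_y := by
  intro y v h _ hD
  exact pv_final y v h hD

theorem get_intervals_at_y_changed : Claim_changed_get_intervals_at_y := by
  unfold Claim_changed_get_intervals_at_y; decide
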